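-- pv_equiv track=rewrite | github.com/shimatoshi/research-reports | biology/fish/rhinogobius/data/haplotype_landlocked_vs_amphidromous.py | find_variable_sites
-- ===== SOURCE A (Python) =====
-- def find_variable_sites(seqs_dict):
--     """可変サイトを検出し、各個体のハプロタイプ（可変サイトのみ）を返す"""
--     if not seqs_dict:
--         return {}, []
--
--     # 全配列のアラインメント長を確認（同じ長さと仮定）
--     all_seqs = list(seqs_dict.values())
--     min_len = min(len(s['seq']) for s in all_seqs)
--
--     # 可変サイトを検出
--     variable_sites = []
--     for pos in range(min_len):
--         bases = set()
--         for s in all_seqs: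
--             base = s['seq'][pos]
--             if base not in ('-', 'N'):
--                 bases.add(base)
--         if len(bases) > 1:
--             variable_sites.append(pos)
--
--     # 各個体の可変サイトのパターン
--     haplotypes = {}
--     for isolate, data in seqs_dict.items():
--         pattern = ''.join(data['seq'][pos] for pos in variable_sites)
--         haplotypes[isolate] = pattern
--
--     return haplotypes, variable_sites
-- ===== SOURCE B (Python) =====
-- def find_variable_sites(seqs_dict):
--     """可変サイトを検出し、各個体のハプロタイプ（可変サイトのみ）を返す"""
--     if not seqs_dict:
--         return {}, []
--
--     # Row-wise single pass: instead of scanning each alignment column and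
--     # building a set of bases, keep per-position incremental state
--     # (first retained base, variable flag) and fold the sequences one by one
--     # into it (zip truncates each row to min_len).  A position is variable
--     # exactly when some retained base differed from the first retained one.
--     seqs = [d['seq'] for d in seqs_dict.values()]
--     min_len = min(map(len, seqs))
--
--     def step(st, b):
--         first, var = st
--         if b in ('-', 'N'):
--             return st
--         if first is None:
--             return (b, var)
--         return (first, var or b != first)
--
--     states = [(None, False)] * min_len
--     for s in seqs:
--         states = [step(st, b) for st, b in zip(states, s)]
--
--     variable_sites = [i for i, (_, var) in enumerate(states) if var]
--
--     haplotypes = {iso: ''.join(d['seq'][i] for i in variable_sites)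
--                   for iso, d in seqs_dict.items()}
--     return haplotypes, variable_sites
-- ===== Notes on version B (the rewrite author's own statement) =====
-- stated objective: alternative
-- what changed: B replaces A's column-wise scan (index every sequence at each position and build a set of bases) by a row-wise single pass that folds the sequences one by one into a per-position accumulator array of (first retained base, variable flag), then reads the variable sites off the flags.
import Mathlib
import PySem

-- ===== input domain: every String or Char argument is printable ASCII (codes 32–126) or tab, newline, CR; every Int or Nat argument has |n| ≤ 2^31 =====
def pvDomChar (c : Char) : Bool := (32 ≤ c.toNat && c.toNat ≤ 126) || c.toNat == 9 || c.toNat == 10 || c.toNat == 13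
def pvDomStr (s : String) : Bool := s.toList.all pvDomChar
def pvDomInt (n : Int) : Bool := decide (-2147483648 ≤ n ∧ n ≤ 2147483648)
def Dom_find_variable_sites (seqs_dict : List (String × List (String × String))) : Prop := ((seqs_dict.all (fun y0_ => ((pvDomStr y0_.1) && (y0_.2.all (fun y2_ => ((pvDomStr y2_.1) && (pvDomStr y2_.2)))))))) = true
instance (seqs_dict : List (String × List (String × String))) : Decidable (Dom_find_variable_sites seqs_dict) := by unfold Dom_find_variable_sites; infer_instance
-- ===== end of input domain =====

-- B replaces A's column-wise scan (per position, index every sequence and build a set of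
-- bases) by a row-wise single pass folding the sequences into a per-position accumulator
-- array of (first retained base, variable flag) (objective: alternative).

-- s['seq'] (a KeyError when the key is absent is excluded by Pre_; the "" default is then never taken)
def pvSeqStr (s : List (String × String)) : String :=
  ((PySem.Dict.ofList s).get? "seq").getD ""

-- ===== PORT A =====
-- the inner 'for s in all_seqs' loop of A building the set of bases at position pos
def pvBases (all_seqs : List (List (String × String))) (pos : Int) : PySem.Set Char :=
  all_seqs.foldl (fun bs s =>
    match PySem.Str.pyGet? (pvSeqStr s) pos with
    | some base => if base ≠ '-' ∧ base ≠ 'N' then PySem.Set.add bs base else bs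
    | none => bs) ([] : PySem.Set Char)

-- A's 'for pos in range(min_len)' loop collecting the variable sites
def pvSitesA (all_seqs : List (List (String × String))) (min_len : Int) : List Int :=
  (PySem.List.pyRange 0 min_len 1).foldl (fun vs pos =>
    if 1 < (pvBases all_seqs pos).length then vs ++ [pos] else vs) ([] : List Int)

-- the haplotype-extraction loop, shared verbatim by both Pythons
def pvHaplotypes (d : PySem.Dict String (List (String × String))) (variable_sites : List Int) :
    List (String × String) :=
  d.items.map (fun p =>
    (p.1, String.ofList (variable_sites.filterMap (fun pos => PySem.Str.pyGet? (pvSeqStr p.2) pos))))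

def find_variable_sites (seqs_dict : List (String × List (String × String))) :
    (List (String × String)) × List Int :=
  if seqs_dict = [] then ([], [])
  else
    let d := PySem.Dict.ofList seqs_dict
    let all_seqs := d.values
    let min_len : Int :=
      (PySem.List.min? (all_seqs.map (fun s => PySem.Str.len (pvSeqStr s))) (fun x => x)).getD 0
    let variable_sites := pvSitesA all_seqs min_len
    (pvHaplotypes d variable_sites, variable_sites)

-- ===== PORT B =====
-- B's step(st, b): fold one base of a row into a position's state (first retained base, variable flag)
def pvStep (st : Option Char × Bool) (b : Char) : Option Char × Bool :=
  if b = '-' ∨ b = 'N' then st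
  else match st.1 with
    | none => (some b, st.2)
    | some f => (some f, st.2 || b != f)

-- B's 'for s in seqs: states = [step(st, b) for st, b in zip(states, s)]' loop
def pvStates (seqs : List (List Char)) (min_len : Nat) : List (Option Char × Bool) :=
  seqs.foldl (fun sts s => List.zipWith pvStep sts s)
    (List.replicate min_len ((none : Option Char), false))

-- B's '[i for i, (_, var) in enumerate(states) if var]' comprehension
def pvSitesB (states : List (Option Char × Bool)) : List Int :=
  ((PySem.List.enumerate states).filter (fun p => p.2.2)).map (fun p => p.1)

def find_variable_sites_alt (seqs_dict : List (String × List (String × String))) :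
    (List (String × String)) × List Int :=
  if seqs_dict = [] then ([], [])
  else
    let d := PySem.Dict.ofList seqs_dict
    let seqs := d.values.map (fun s => (pvSeqStr s).toList)
    let min_len : Nat :=
      (((PySem.List.min? (seqs.map (fun l => (l.length : Int))) (fun x => x)).getD 0)).toNat
    let variable_sites := pvSitesB (pvStates seqs min_len)
    (pvHaplotypes d variable_sites, variable_sites)

-- ===== PRECONDITION & SPEC =====
-- Pre_ excludes exactly the inputs where some isolate's inner dict lacks the key "seq":
-- there the Python A raises KeyError (returns nothing).
def Pre_find_variable_sites (seqs_dict : List (String × List (String × String))) : Prop :=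
  ∀ p ∈ seqs_dict, "seq" ∈ p.2.map Prod.fst

instance (seqs_dict : List (String × List (String × String))) :
    Decidable (Pre_find_variable_sites seqs_dict) := by
  unfold Pre_find_variable_sites; infer_instance

def pvWitness_find_variable_sites : (List (String × List (String × String))) :=
  [("iso1", [("seq", "ACGT")]), ("iso2", [("seq", "AGGT")])]

def Spec_find_variable_sites (seqs_dict : List (String × List (String × String)))
    (out : (List (String × String)) × List Int) : Prop :=
  out = find_variable_sites_alt seqs_dict

instance (seqs_dict : List (String × List (String × String)))
    (out : (List (String × String)) × List Int) :
    Decidable (Spec_find_variable_sites seqs_dict out) := by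
  unfold Spec_find_variable_sites; infer_instance

-- ===== CLAIM =====
def Claim_equal_find_variable_sites : Prop :=
  ∀ (seqs_dict : List (String × List (String × String))),
    Dom_find_variable_sites seqs_dict → Pre_find_variable_sites seqs_dict →
      Spec_find_variable_sites seqs_dict (find_variable_sites seqs_dict)

-- ===== LEMMAS AND PROOFS =====

-- zipWith over a (range M).map state list with a long enough row is a pointwise map
theorem zipWith_map_range {σ : Type} (M : Nat) (g : Nat → σ) (f : σ → Char → σ)
    (r : List Char) (hr : M ≤ r.length) :
    List.zipWith f ((List.range M).map g) r
      = (List.range M).map (fun i => f (g i) (r.getD i ' ')) := by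
  apply List.ext_getElem
  · simp; omega
  · intro i h1 h2
    have hiM : i < M := by simpa using h2
    have hir : i < r.length := lt_of_lt_of_le hiM hr
    simp [List.getElem_zipWith, hir]

-- the row-wise fold of B computes, per position, the column fold
theorem states_eq_colfold (M : Nat) : ∀ (rows : List (List Char)) (g : Nat → Option Char × Bool),
    (∀ r ∈ rows, M ≤ r.length) →
    rows.foldl (fun sts s => List.zipWith pvStep sts s) ((List.range M).map g)
      = (List.range M).map (fun i => (rows.map (fun r => r.getD i ' ')).foldl pvStep (g i)) := by
  intro rows
  induction rows with
  | nil => intro g _; simp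
  | cons r rs ih =>
    intro g hlen
    rw [List.foldl_cons, zipWith_map_range M g pvStep r (hlen r (by simp)),
        ih (fun i => pvStep (g i) (r.getD i ' ')) (fun r' hr' => hlen r' (by simp [hr']))]
    simp

-- once the first retained base is fixed, the fold only accumulates the differs-flag
theorem colfold_some (k : Char) : ∀ (col : List Char) (v : Bool),
    col.foldl pvStep (some k, v)
      = (some k, v || (col.filter (fun b => b != '-' && b != 'N')).any (fun b => b != k)) := by
  intro col
  induction col with
  | nil => intro v; simp
  | cons b rest ih =>
    intro v
    by_cases hb : b = '-' ∨ b = 'N'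
    · have : (b != '-' && b != 'N') = false := by
        rcases hb with h | h <;> simp [h]
      simp [List.foldl_cons, pvStep, hb, ih, this]
    · have : (b != '-' && b != 'N') = true := by
        push Not at hb; simp [hb.1, hb.2]
      simp [List.foldl_cons, pvStep, hb, ih, this, Bool.or_assoc]

-- the flag computed by a column fold, in terms of the retained bases of the column
theorem colfold_flag : ∀ (col : List Char),
    (col.foldl pvStep ((none : Option Char), false)).2
      = (match col.filter (fun b => b != '-' && b != 'N') with
         | [] => false
         | k :: rest => rest.any (fun b => b != k)) := by
  intro col
  induction col with
  | nil => simp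
  | cons b rest ih =>
    by_cases hb : b = '-' ∨ b = 'N'
    · have : (b != '-' && b != 'N') = false := by
        rcases hb with h | h <;> simp [h]
      simp [List.foldl_cons, pvStep, hb, ih, this]
    · have : (b != '-' && b != 'N') = true := by
        push Not at hb; simp [hb.1, hb.2]
      simp [List.foldl_cons, pvStep, hb, colfold_some, this]

theorem enum_map_range {α : Type} (M : Nat) : ∀ (f : Nat → α) (s : Int),
    PySem.List.enumerate ((List.range M).map f) s
      = (List.range M).map (fun (i : Nat) => (s + (i : Int), f i)) := by
  induction M with
  | zero => intro f s; simp [PySem.List.enumerate_nil]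
  | succ M ih =>
    intro f s
    rw [List.range_succ_eq_map]
    simp only [List.map_cons, List.map_map]
    rw [PySem.List.enumerate_cons]
    rw [ih (f ∘ Nat.succ) (s + 1)]
    congr 1
    · simp
    · apply List.map_congr_left
      intro i _
      simp only [Function.comp_apply, Prod.mk.injEq]
      refine ⟨by push_cast; ring, trivial⟩

theorem set_two_iff (kept : List Char) :
    decide (1 < (PySem.Set.ofList kept).length)
      = (match kept with | [] => false | k :: rest => rest.any (fun b => b != k)) := by
  cases kept with
  | nil => simp [PySem.Set.ofList_nil]
  | cons k rest =>
    rw [PySem.Set.ofList_cons]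
    simp only [List.length_cons]
    have h2 : (0 < (PySem.Set.discard (PySem.Set.ofList rest) k).length)
        ↔ rest.any (fun b => b != k) = true := by
      rw [List.length_pos_iff_exists_mem]
      simp [PySem.Set.mem_discard, PySem.Set.mem_ofList, List.any_eq_true, And.comm]
    cases hb : rest.any (fun b => b != k) with
    | false =>
      rw [hb] at h2
      simp only [decide_eq_false_iff_not]
      simp only [Bool.false_eq_true, iff_false, Nat.not_lt, Nat.le_zero] at h2
      omega
    | true =>
      rw [hb] at h2
      simp only [decide_eq_true_eq]
      simp only [iff_true] at h2
      omega

theorem bases_eq (all_seqs : List (List (String × String))) (i : Nat)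
    (hi : ∀ s ∈ all_seqs, i < (pvSeqStr s).toList.length) :
    pvBases all_seqs (i : Int)
      = PySem.Set.ofList ((all_seqs.map (fun s => (pvSeqStr s).toList.getD i ' ')).filter
          (fun b => b != '-' && b != 'N')) := by
  unfold pvBases
  rw [PySem.List.foldl_congr_mem all_seqs _
      (fun bs s => if (pvSeqStr s).toList.getD i ' ' ≠ '-' ∧ (pvSeqStr s).toList.getD i ' ' ≠ 'N'
        then PySem.Set.add bs ((pvSeqStr s).toList.getD i ' ') else bs) _
      (by intro bs s hs
          have h := hi s hs
          rw [PySem.Str.pyGet?_natCast, List.getElem?_eq_getElem h]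
          simp only [List.getD_eq_getElem _ _ h])]
  rw [PySem.List.foldl_ite_eq_foldl_filter
      (fun s => (pvSeqStr s).toList.getD i ' ' ≠ '-' ∧ (pvSeqStr s).toList.getD i ' ' ≠ 'N')
      (fun bs s => PySem.Set.add bs ((pvSeqStr s).toList.getD i ' '))]
  rw [List.filter_map, PySem.Set.ofList_eq_foldl, List.foldl_map]
  congr 1
  apply List.filter_congr
  intro s _
  simp only [Function.comp_def]
  rw [Bool.eq_iff_iff]
  simp [bne_iff_ne]

theorem values_ofList_ne_nil (l : List (String × List (String × String))) (h : l ≠ []) :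
    (PySem.Dict.ofList l).values ≠ [] := by
  have hk : (PySem.Dict.ofList l).keys = PySem.Set.ofList (l.map Prod.fst) := by
    show (PySem.Dict.empty.update l).keys = _
    unfold PySem.Dict.update
    rw [PySem.Dict.keys_foldl_insert_key l Prod.fst (fun _ p => p.2) PySem.Dict.empty]
    rw [PySem.Dict.keys_empty]
    exact PySem.Set.update_empty _
  intro hv
  have hitems : (PySem.Dict.ofList l).items = [] :=
    List.map_eq_nil_iff.mp (show ((PySem.Dict.ofList l).items.map (fun x => x.2)) = [] from hv)
  cases l with
  | nil => exact h rfl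
  | cons p t =>
    have hkeys : (PySem.Dict.ofList (p :: t)).keys = [] := by
      show ((PySem.Dict.ofList (p :: t)).items.map (fun x => x.1)) = []
      rw [hitems]
      rfl
    rw [hk] at hkeys
    simp [PySem.Set.ofList_cons] at hkeys

theorem sites_eq (all_seqs : List (List (String × String))) (hne : all_seqs ≠ []) :
    pvSitesA all_seqs
        ((PySem.List.min? (all_seqs.map (fun s => PySem.Str.len (pvSeqStr s))) (fun x => x)).getD 0)
      = pvSitesB (pvStates (all_seqs.map (fun s => (pvSeqStr s).toList))
          ((((PySem.List.min? ((all_seqs.map (fun s => (pvSeqStr s).toList)).map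
              (fun l => ((l.length : Int)))) (fun x => x)).getD 0)).toNat)) := by
  set ls := all_seqs.map (fun s => (pvSeqStr s).toList) with hls
  have hlens : all_seqs.map (fun s => PySem.Str.len (pvSeqStr s)) = ls.map (fun l => (l.length : Int)) := by
    rw [hls, List.map_map]
    apply List.map_congr_left
    intro s _
    simp [PySem.Str.len_eq, Function.comp]
  rw [hlens]
  obtain ⟨m, hm⟩ : ∃ m, PySem.List.min? (ls.map (fun l => ((l.length : Int)))) (fun x => x) = some m := by
    cases hmm : PySem.List.min? (ls.map (fun l => ((l.length : Int)))) (fun x => x) with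
    | none =>
      rw [PySem.List.min?_eq_none_iff, List.map_eq_nil_iff, hls, List.map_eq_nil_iff] at hmm
      exact absurd hmm hne
    | some m => exact ⟨m, rfl⟩
  have hmem := PySem.List.min?_mem hm
  have hmin := PySem.List.min?_isMin hm
  obtain ⟨a, ha, ham⟩ := List.mem_map.mp hmem
  have hMle : ∀ l ∈ ls, a.length ≤ l.length := by
    intro l hl
    have := hmin _ (List.mem_map_of_mem (f := fun l => ((l.length : Int))) hl)
    rw [← ham] at this
    exact_mod_cast this
  rw [hm, Option.getD_some, ← ham, Int.toNat_natCast]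
  unfold pvStates
  rw [show List.replicate a.length ((none : Option Char), false)
        = (List.range a.length).map (fun _ => ((none : Option Char), false)) by
      simp [List.map_const']]
  rw [states_eq_colfold a.length ls _ hMle]
  unfold pvSitesA pvSitesB
  rw [PySem.List.pyRange_zero_natCast]
  rw [PySem.List.foldl_append_ite_eq_filter (fun pos => 1 < (pvBases all_seqs pos).length)]
  rw [enum_map_range]
  rw [List.filter_map, List.filter_map, List.map_map, List.nil_append]
  rw [List.filter_congr (q := (fun p : Int × (Option Char × Bool) => p.2.2) ∘
        fun i : Nat => ((0 : Int) + (i : Int), (ls.map (fun r => r.getD i ' ')).foldl pvStep (none, false)))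
      (by intro i hi
          have hiM : i < a.length := List.mem_range.mp hi
          simp only [Function.comp_apply]
          have hilen : ∀ s ∈ all_seqs, i < (pvSeqStr s).toList.length := by
            intro s hs
            have : (pvSeqStr s).toList ∈ ls := by rw [hls]; exact List.mem_map_of_mem hs
            have := hMle _ this
            omega
          rw [bases_eq all_seqs i hilen]
          rw [set_two_iff]
          rw [colfold_flag]
          rw [hls, List.map_map]
          simp only [Function.comp_def])]
  apply List.map_congr_left
  intro i _
  simp [Function.comp]

-- ===== VERDICT =====
theorem find_variable_sites_spec : Claim_equal_find_variable_sites := by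
  intro sd _ _
  unfold Spec_find_variable_sites
  by_cases hsd : sd = []
  · rw [find_variable_sites, find_variable_sites_alt, if_pos hsd, if_pos hsd]
  · rw [find_variable_sites, find_variable_sites_alt, if_neg hsd, if_neg hsd]
    have hs := sites_eq (PySem.Dict.ofList sd).values (values_ofList_ne_nil sd hsd)
    dsimp only
    rw [hs]
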